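-- pv_equiv track=rewrite | github.com/Lyusternik/pxpa | pxpa.py | setOffsets
-- ===== SOURCE A (Python) =====
-- def setOffsets(words):
-- 	offsets = []
-- 	offsets.append(0)
-- 	length = len(words[0])
-- 	for i in range(0, len(words)):
-- 		if length != len(words[i]):
-- 			offsets.append(i)
-- 			length = len(words[i])
-- 	return offsets
-- ===== SOURCE B (Python) =====
-- def setOffsets(words):
--     # Run-length decomposition: split the length sequence into maximal runs
--     # of equal length, then the offsets are the prefix sums of the run sizes.
--     lens = [len(w) for w in words]
--     n = len(lens)
--     runs = []
--     i = 0
--     while i < n: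
--         k = i + 1
--         while k < n and lens[k] == lens[i]:
--             k += 1
--         runs.append(k - i)
--         i = k
--     starts = []
--     acc = 0
--     for r in runs:
--         starts.append(acc)
--         acc += r
--     return starts
-- ===== Notes on version B (the rewrite author's own statement) =====
-- stated objective: alternative
-- what changed: B replaces A's single index loop carrying the previous length with a run-length decomposition of the length sequence followed by a prefix-sum of the run sizes.
import Mathlib
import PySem

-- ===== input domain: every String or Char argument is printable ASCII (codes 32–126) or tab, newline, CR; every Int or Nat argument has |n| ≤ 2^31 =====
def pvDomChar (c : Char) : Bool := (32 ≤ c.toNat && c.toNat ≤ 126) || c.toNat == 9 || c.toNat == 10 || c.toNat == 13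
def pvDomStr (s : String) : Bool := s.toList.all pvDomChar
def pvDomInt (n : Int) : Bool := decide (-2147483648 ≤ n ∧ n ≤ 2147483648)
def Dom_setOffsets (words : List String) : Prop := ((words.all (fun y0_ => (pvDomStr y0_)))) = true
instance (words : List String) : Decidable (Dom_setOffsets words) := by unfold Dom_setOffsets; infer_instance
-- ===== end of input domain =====

-- B replaces A's single scan carrying the previous length by a run-length
-- decomposition of the length sequence plus a prefix-sum of run sizes
-- (objective: alternative); on [] A raises IndexError, B returns [].


-- ===== PORT A =====
-- the for-loop of A: state = (offsets so far, current length), index counter i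
def setOffsetsLoop (ws : List String) (i : Int) (offsets : List Int) (length : Int) : List Int :=
  match ws with
  | [] => offsets
  | w :: rest =>
    if length ≠ PySem.Str.len w then
      setOffsetsLoop rest (i + 1) (offsets ++ [i]) (PySem.Str.len w)
    else
      setOffsetsLoop rest (i + 1) offsets length

def setOffsets (words : List String) : List Int :=
  match words with
  | [] => []   -- Python raises IndexError here (len(words[0])); excluded by Pre_setOffsets
  | w :: _ => setOffsetsLoop words 0 [0] (PySem.Str.len w)

-- ===== PORT B =====
-- Source B's outer while loop: peel one maximal run off the front of lens; the
-- inner counting while-loop is exactly the length of the equal prefix of the tail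
def pvRuns (lens : List Int) : List Int :=
  match lens with
  | [] => []
  | l :: ls =>
    let t := (ls.takeWhile (fun x => x == l)).length
    ((1 : Int) + t) :: pvRuns (ls.drop t)
termination_by lens.length
decreasing_by
  simp only [List.length_cons]
  exact Nat.lt_succ_of_le (List.length_drop ▸ Nat.sub_le _ _)

-- Source B's prefix-sum loop over runs
def pvStartsLoop (runs : List Int) (starts : List Int) (acc : Int) : List Int :=
  match runs with
  | [] => starts
  | r :: rest => pvStartsLoop rest (starts ++ [acc]) (acc + r)

def setOffsets_alt (words : List String) : List Int :=
  pvStartsLoop (pvRuns (words.map PySem.Str.len)) [] 0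

-- ===== PRECONDITION & SPEC =====
-- Pre_ excludes only the empty list, on which A raises IndexError (len(words[0]))
def Pre_setOffsets (words : List String) : Prop := words ≠ []
instance (words : List String) : Decidable (Pre_setOffsets words) := by unfold Pre_setOffsets; infer_instance
def pvWitness_setOffsets : List String := ["a", "bc", "de"]

def Spec_setOffsets (words : List String) (out : List Int) : Prop := out = setOffsets_alt words
instance (words : List String) (out : List Int) : Decidable (Spec_setOffsets words out) := by unfold Spec_setOffsets; infer_instance

-- ===== CLAIM (what is proved, stated in full; the proofs are below) =====
def Claim_equal_setOffsets : Prop := ∀ (words : List String), Dom_setOffsets words → Pre_setOffsets words → Spec_setOffsets words (setOffsets words)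

-- ===== LEMMAS AND PROOFS =====

-- A's loop on the list of lengths only
def aL (xs : List Int) (i L : Int) : List Int :=
  match xs with
  | [] => []
  | x :: rest => if L ≠ x then i :: aL rest (i + 1) x else aL rest (i + 1) L

-- pure prefix-sum form of pvStartsLoop
def bS (runs : List Int) (acc : Int) : List Int :=
  match runs with
  | [] => []
  | r :: rest => acc :: bS rest (acc + r)

theorem pvStartsLoop_eq (runs : List Int) : ∀ starts acc,
    pvStartsLoop runs starts acc = starts ++ bS runs acc := by
  induction runs with
  | nil => intro s a; simp [pvStartsLoop, bS]
  | cons r rest ih => intro s a; simp [pvStartsLoop, bS, ih]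

theorem setOffsetsLoop_eq (ws : List String) : ∀ i offsets L,
    setOffsetsLoop ws i offsets L = offsets ++ aL (ws.map PySem.Str.len) i L := by
  induction ws with
  | nil => intro i o L; simp [setOffsetsLoop, aL]
  | cons w rest ih =>
    intro i o L
    simp only [setOffsetsLoop, aL, List.map_cons, ih]
    split_ifs with h <;> simp

theorem dropWhile_eq_drop_len_takeWhile (p : Int → Bool) : ∀ l : List Int,
    l.dropWhile p = l.drop ((l.takeWhile p).length) := by
  intro l; induction l with
  | nil => simp
  | cons x xs ih =>
    by_cases h : p x <;> simp [h, ih]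

theorem aL_skip (xs : List Int) (i L : Int) : aL (L :: xs) i L = aL xs (i + 1) L := by
  simp [aL]

-- main invariant: A's scan with current length L equals B's run prefix sums
-- after the leading run of L is skipped
theorem aL_eq_bS (n : Nat) : ∀ (xs : List Int), xs.length ≤ n → ∀ (i L : Int),
    aL xs i L = bS (pvRuns (xs.dropWhile (fun x => x == L)))
                  (i + ((xs.takeWhile (fun x => x == L)).length : Int)) := by
  induction n with
  | zero =>
    intro xs hlen i L
    have : xs = [] := List.length_eq_zero_iff.mp (Nat.le_zero.mp hlen)
    subst this; simp [aL, pvRuns, bS]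
  | succ n ih =>
    intro xs hlen i L
    match xs with
    | [] => simp [aL, pvRuns, bS]
    | x :: rest =>
      by_cases h : L = x
      · subst h
        have h1 : aL (L :: rest) i L = aL rest (i + 1) L := aL_skip rest i L
        rw [h1, ih rest (Nat.le_of_succ_le_succ hlen) (i + 1) L]
        simp [List.takeWhile, List.dropWhile]
        ring_nf
      · have hne : (x == L) = false := by simp; exact fun e => h e.symm
        simp only [aL, if_pos (by exact h), List.dropWhile_cons, hne,
          List.takeWhile_cons, Bool.false_eq_true, if_false]
        simp only [List.length_nil, Nat.cast_zero, add_zero]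
        rw [pvRuns]
        simp only [bS]
        congr 1
        rw [ih rest (Nat.le_of_succ_le_succ hlen) (i + 1) x,
          dropWhile_eq_drop_len_takeWhile]
        ring_nf

-- ===== VERDICT (by name: the statement is the Claim_ definition above) =====
theorem setOffsets_spec : Claim_equal_setOffsets := by
  intro words _ hpre
  unfold Spec_setOffsets
  match words with
  | [] => exact absurd rfl hpre
  | w :: ws =>
    show setOffsetsLoop (w :: ws) 0 [0] (PySem.Str.len w) = _
    unfold setOffsets_alt
    rw [setOffsetsLoop_eq, pvStartsLoop_eq]
    simp only [List.map_cons, List.nil_append]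
    rw [aL_skip, aL_eq_bS (ws.map PySem.Str.len).length _ (le_refl _)]
    rw [pvRuns]
    simp only [bS]
    rw [dropWhile_eq_drop_len_takeWhile]
    simp only [List.cons_append, List.nil_append]
    congr 1
    ring_nf
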